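-- pv_equiv track=rewrite | github.com/naveenkumar150307/Phishing_detection | src/ssl_dns_layer.py | _is_within_org
-- ===== SOURCE A (Python) =====
-- from typing import Dict, Any, Tuple, List, Optional
--
-- def _is_within_org(hostname: str, org_domains: Optional[List[str]]) -> bool:
--     if not org_domains:
--         return False
--     h = hostname.lower()
--     for root in org_domains:
--         r = root.lstrip(".").lower()
--         if h == r or h.endswith("." + r):
--             return True
--     return False
-- ===== SOURCE B (Python) =====
-- def _is_within_org(hostname, org_domains):
--     if not org_domains:
--         return False
--     roots = {d.lstrip(".").lower() for d in org_domains}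
--     h = hostname.lower()
--     suffixes = [h]
--     for i, c in enumerate(h):
--         if c == '.':
--             suffixes.append(h[i + 1:])
--     return any(s in roots for s in suffixes)
-- ===== Notes on version B (the rewrite author's own statement) =====
-- stated objective: alternative
-- what changed: B inverts the traversal: it builds a set of normalized roots once and scans the hostname's dot-suffixes for membership, instead of A's scan over org_domains testing string-suffix against each root.
import Mathlib
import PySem

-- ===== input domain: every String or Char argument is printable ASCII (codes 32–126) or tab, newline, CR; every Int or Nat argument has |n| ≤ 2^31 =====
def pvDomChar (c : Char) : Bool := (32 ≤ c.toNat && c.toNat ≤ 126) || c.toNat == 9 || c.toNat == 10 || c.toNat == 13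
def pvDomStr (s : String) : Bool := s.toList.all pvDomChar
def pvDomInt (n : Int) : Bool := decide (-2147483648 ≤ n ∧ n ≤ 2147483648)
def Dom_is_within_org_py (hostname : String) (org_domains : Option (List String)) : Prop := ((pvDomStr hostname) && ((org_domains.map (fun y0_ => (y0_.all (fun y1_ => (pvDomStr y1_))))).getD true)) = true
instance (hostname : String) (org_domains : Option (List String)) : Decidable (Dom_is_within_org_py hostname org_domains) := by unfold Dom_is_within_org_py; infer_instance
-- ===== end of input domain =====

-- B inverts the traversal: a set of normalized roots is built once and the hostname's
-- dot-suffixes are checked for membership, instead of scanning org_domains against the hostname.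


-- ===== PORT A =====
-- root.lstrip(".") has no PySem primitive with a chars argument; dropWhile (· == '.') is
-- exact for the single strip character '.'.
def pvNormRoot (root : String) : List Char :=
  PySem.Chars.lower (root.toList.dropWhile (fun c => c == '.'))

-- the 'for root in org_domains' loop with its early return
def pvALoop (h : List Char) : List String → Bool
  | [] => false
  | root :: rest =>
    let r := pvNormRoot root
    if h == r || PySem.Chars.endswith h ('.' :: r) then true else pvALoop h rest

def is_within_org_py (hostname : String) (org_domains : Option (List String)) : Bool :=
  match org_domains with
  | none => false
  | some l =>
    if l = [] then false
    else pvALoop (PySem.Chars.lower hostname.toList) l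

-- ===== PORT B =====
-- the 'for i, c in enumerate(h): if c == '.': suffixes.append(h[i+1:])' scan
def pvDotTails : List Char → List (List Char)
  | [] => []
  | c :: t => if c == '.' then t :: pvDotTails t else pvDotTails t

def is_within_org_py_alt (hostname : String) (org_domains : Option (List String)) : Bool :=
  match org_domains with
  | none => false
  | some l =>
    if l = [] then false
    else
      let roots : PySem.Set (List Char) := PySem.Set.ofList (l.map pvNormRoot)
      let h := PySem.Chars.lower hostname.toList
      (h :: pvDotTails h).any (fun s => PySem.Set.contains roots s)

-- ===== PRECONDITION & SPEC =====
def Spec_is_within_org_py (hostname : String) (org_domains : Option (List String)) (out : Bool) : Prop := out = is_within_org_py_alt hostname org_domains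
instance (hostname : String) (org_domains : Option (List String)) (out : Bool) : Decidable (Spec_is_within_org_py hostname org_domains out) := by unfold Spec_is_within_org_py; infer_instance

-- ===== CLAIM (what is proved, stated in full; the proofs are below) =====
def Claim_equal_is_within_org_py : Prop := ∀ (hostname : String) (org_domains : Option (List String)), Dom_is_within_org_py hostname org_domains → Spec_is_within_org_py hostname org_domains (is_within_org_py hostname org_domains)

-- ===== LEMMAS AND PROOFS =====

-- r is a "dot tail" of h exactly when '.'++r is a suffix of h
theorem mem_pvDotTails (h r : List Char) : r ∈ pvDotTails h ↔ ('.' :: r) <:+ h := by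
  induction h with
  | nil => simp [pvDotTails]
  | cons c t ih =>
    simp only [pvDotTails]
    by_cases hc : c = '.'
    · subst hc
      rw [if_pos (by decide : (('.' == '.') : Bool) = true)]
      simp [List.mem_cons, List.suffix_cons_iff, ih]
    · rw [if_neg (by simpa using hc), ih, List.suffix_cons_iff]
      simp [Ne.symm hc]

theorem pvALoop_eq_true_iff (h : List Char) (l : List String) :
    pvALoop h l = true ↔ ∃ root ∈ l, h = pvNormRoot root ∨ ('.' :: pvNormRoot root) <:+ h := by
  induction l with
  | nil => simp [pvALoop]
  | cons root rest ih =>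
    simp only [pvALoop]
    by_cases hm : h == pvNormRoot root || PySem.Chars.endswith h ('.' :: pvNormRoot root)
    · rw [if_pos hm]
      have hm' : h = pvNormRoot root ∨ ('.' :: pvNormRoot root) <:+ h := by
        simpa [PySem.Chars.endswith_iff] using hm
      exact iff_of_true rfl ⟨root, List.mem_cons_self .., hm'⟩
    · rw [if_neg hm, ih]
      constructor
      · rintro ⟨x, hx, hp⟩; exact ⟨x, List.mem_cons_of_mem _ hx, hp⟩
      · rintro ⟨x, hx, hp⟩
        rcases List.mem_cons.mp hx with rfl | hx'
        · exfalso; apply hm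
          rcases hp with rfl | hp
          · simp
          · simp [PySem.Chars.endswith_iff, hp]
        · exact ⟨x, hx', hp⟩

theorem pvAlt_any_iff (h : List Char) (l : List String) :
    ((h :: pvDotTails h).any (fun s => PySem.Set.contains (PySem.Set.ofList (l.map pvNormRoot)) s) = true)
      ↔ ∃ root ∈ l, h = pvNormRoot root ∨ ('.' :: pvNormRoot root) <:+ h := by
  simp only [List.any_eq_true, List.mem_cons]
  constructor
  · rintro ⟨s, hs, hc⟩
    have hmem : s ∈ PySem.Set.ofList (l.map pvNormRoot) := by
      simpa [PySem.Set.contains] using hc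
    rw [PySem.Set.mem_ofList] at hmem
    rcases List.mem_map.mp hmem with ⟨root, hroot, rfl⟩
    rcases hs with rfl | hs
    · exact ⟨root, hroot, Or.inl rfl⟩
    · exact ⟨root, hroot, Or.inr ((mem_pvDotTails h _).mp hs)⟩
  · rintro ⟨root, hroot, hp⟩
    refine ⟨pvNormRoot root, ?_, ?_⟩
    · rcases hp with rfl | hp
      · exact Or.inl rfl
      · exact Or.inr ((mem_pvDotTails h _).mpr hp)
    · simp only [PySem.Set.contains]
      simp [PySem.Set.mem_ofList, List.mem_map]
      exact ⟨root, hroot, rfl⟩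

-- ===== VERDICT (by name: the statement is the Claim_ definition above) =====
theorem is_within_org_py_spec : Claim_equal_is_within_org_py := by
  intro hostname org_domains _
  unfold Spec_is_within_org_py is_within_org_py is_within_org_py_alt
  match org_domains with
  | none => rfl
  | some l =>
    by_cases hl : l = []
    · simp [hl]
    · simp only [if_neg hl]
      rw [Bool.eq_iff_iff, pvALoop_eq_true_iff, pvAlt_any_iff]
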